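-- pv_equiv track=rewrite | github.com/rkrud/PythonStudy-2024-Summer | study/morsecode/morsecode/morsecode.py | get_cleaned_english_sentence
-- ===== SOURCE A (Python) =====
-- def get_cleaned_english_sentence(raw_english_sentence):
--
--     for i in ".,!?":
--         raw_english_sentence = raw_english_sentence.replace(i, "")
--
--     raw_english_sentence = raw_english_sentence.strip()
--
--     return raw_english_sentence
--
--     """
--     Input:
--         - raw_english_sentence : 문자열값으로 Morse Code로 변환 가능한 영어 문장
--     Output:
--         - 입력된 영어문장에수 4개의 문장부호를 ".,!?" 삭제하고, 양쪽끝 여백을 제거한 문자열 값 반환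
--     Examples:
--         >>> import morsecode as mc
--         >>> mc.get_cleaned_english_sentence("This is Gachon!!")
--         'This is Gachon'
--         >>> mc.get_cleaned_english_sentence("Is this Gachon?")
--         'Is this Gachon'
--         >>> mc.get_cleaned_english_sentence("How are you?")
--         'How are you'
--         >>> mc.get_cleaned_english_sentence("Fine, Thank you. and you?")
--         'Fine Thank you and you'
--     """
-- ===== SOURCE B (Python) =====
-- def get_cleaned_english_sentence(raw_english_sentence):
--     return "".join(c for c in raw_english_sentence if c not in ".,!?").strip()
-- ===== Notes on version B (the rewrite author's own statement) =====
-- stated objective: simpler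
-- what changed: Replaces A's four sequential full-string replace scans (one per punctuation character) with a single filtering pass that keeps every non-punctuation character, then strips the ends.
import Mathlib
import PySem

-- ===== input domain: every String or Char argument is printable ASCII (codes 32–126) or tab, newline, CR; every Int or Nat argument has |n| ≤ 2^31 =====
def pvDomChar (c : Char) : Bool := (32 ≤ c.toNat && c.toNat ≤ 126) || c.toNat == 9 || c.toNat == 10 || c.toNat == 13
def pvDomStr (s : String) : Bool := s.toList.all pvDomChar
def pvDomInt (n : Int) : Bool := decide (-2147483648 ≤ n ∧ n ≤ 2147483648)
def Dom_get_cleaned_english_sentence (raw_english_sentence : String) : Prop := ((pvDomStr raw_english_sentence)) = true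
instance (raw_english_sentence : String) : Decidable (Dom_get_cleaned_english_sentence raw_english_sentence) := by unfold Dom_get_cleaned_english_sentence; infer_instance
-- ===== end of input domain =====

-- B replaces A's four sequential replace scans with a single filtering pass, then strips; objective: simpler.

-- ===== PORT A =====
-- for i in ".,!?": s = s.replace(i, "") ; then s.strip()
def get_cleaned_english_sentence (raw_english_sentence : String) : String :=
  PySem.Str.strip
    ((".,!?".toList).foldl
      (fun s i => PySem.Str.replace s (String.ofList [i]) "") raw_english_sentence)

-- ===== PORT B =====
-- "".join(c for c in raw_english_sentence if c not in ".,!?").strip()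
def get_cleaned_english_sentence_alt (raw_english_sentence : String) : String :=
  PySem.Str.strip
    (String.ofList (raw_english_sentence.toList.filter (fun c => !(".,!?".toList.contains c))))

-- ===== PRECONDITION & SPEC =====
def Spec_get_cleaned_english_sentence (raw_english_sentence : String) (out : String) : Prop := out = get_cleaned_english_sentence_alt raw_english_sentence
instance (raw_english_sentence : String) (out : String) : Decidable (Spec_get_cleaned_english_sentence raw_english_sentence out) := by unfold Spec_get_cleaned_english_sentence; infer_instance

-- ===== CLAIM (what is proved, stated in full; the proofs are below) =====
def Claim_equal_get_cleaned_english_sentence : Prop := ∀ (raw_english_sentence : String), Dom_get_cleaned_english_sentence raw_english_sentence → Spec_get_cleaned_english_sentence raw_english_sentence (get_cleaned_english_sentence raw_english_sentence)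

-- ===== LEMMAS AND PROOFS =====

-- replace.go deleting a single character is a filter (with enough fuel)
theorem replace_go_single (c : Char) :
    ∀ (l : List Char) (fuel : Nat) (acc : List Char), l.length ≤ fuel →
      PySem.Chars.replace.go [c] [] fuel l acc = acc.reverse ++ l.filter (fun x => !(x == c)) := by
  intro l
  induction l with
  | nil =>
      intro fuel acc _
      cases fuel <;> simp [PySem.Chars.replace.go]
  | cons d t ih =>
      intro fuel acc h
      cases fuel with
      | zero => simp at h
      | succ f =>
          by_cases hd : d = c
          · subst hd
            have step : PySem.Chars.replace.go [d] [] (f+1) (d :: t) acc =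
                PySem.Chars.replace.go [d] [] f t acc := by
              simp [PySem.Chars.replace.go, List.isPrefixOf]
            rw [step, ih f acc (by simpa using Nat.le_of_succ_le_succ h)]
            simp
          · have hbe : (d == c) = false := by simp [hd]
            have hbe' : (c == d) = false := by simp [Ne.symm hd]
            have step : PySem.Chars.replace.go [c] [] (f+1) (d :: t) acc =
                PySem.Chars.replace.go [c] [] f t (d :: acc) := by
              simp [PySem.Chars.replace.go, List.isPrefixOf, hbe']
            rw [step, ih f (d :: acc) (by simpa using Nat.le_of_succ_le_succ h)]
            simp [hbe]

theorem replace_single (s : String) (c : Char) :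
    PySem.Str.replace s (String.ofList [c]) "" =
      String.ofList (s.toList.filter (fun x => !(x == c))) := by
  have h1 : (String.ofList [c]).toList = [c] := String.toList_ofList
  have h2 : ("" : String).toList = [] := rfl
  simp only [PySem.Str.replace, h1, h2]
  unfold PySem.Chars.replace
  rw [if_neg (by simp), replace_go_single c s.toList s.toList.length [] (le_refl _)]
  simp

-- ===== VERDICT (by name: the statement is the Claim_ definition above) =====
theorem get_cleaned_english_sentence_spec : Claim_equal_get_cleaned_english_sentence := by
  intro s _
  unfold Spec_get_cleaned_english_sentence get_cleaned_english_sentence get_cleaned_english_sentence_alt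
  have e : (".,!?".toList) = ['.', ',', '!', '?'] := by decide
  rw [e]
  simp only [List.foldl_cons, List.foldl_nil, replace_single, String.toList_ofList,
    List.filter_filter]
  congr 2
  apply List.filter_congr
  intro x _
  cases h1 : x == '.' <;> cases h2 : x == ',' <;> cases h3 : x == '!' <;> cases h4 : x == '?' <;>
    simp only [List.contains_cons, List.contains_nil, h1, h2, h3, h4, Bool.or_false,
      Bool.or_true, Bool.true_or, Bool.false_or, Bool.not_true, Bool.not_false,
      Bool.and_true, Bool.true_and, Bool.false_and, Bool.and_false]
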